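-- pv_equiv track=rewrite | github.com/Zhang-Zhaoji/scientific-bulletin | visualize/vis_stat.py | get_score_distribution
-- ===== SOURCE A (Python) =====
-- def get_score_distribution(results: list) -> list[tuple[str, int]]:
--     """
--     统计评分分布
--     :param results: LLM处理后的结果列表
--     :return: [(score_range, count), ...]
--     """
--     bins = [(0, 1), (1, 2), (2, 3), (3, 4), (4, 5), (5, 6), (6, 7), (7, 8), (8, 9), (9, 10)]
--     counts = [0] * len(bins)
--
--     for result in results:
--         score = result.get('total_score', 0)
--         for i, (low, high) in enumerate(bins):
--             if low <= score < high:
--                 counts[i] += 1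
--                 break
--
--     return [(f"{low}-{high}", count) for (low, high), count in zip(bins, counts) if count > 0]
-- ===== SOURCE B (Python) =====
-- def get_score_distribution(results: list) -> list[tuple[str, int]]:
--     bins = [(0, 1), (1, 2), (2, 3), (3, 4), (4, 5), (5, 6), (6, 7), (7, 8), (8, 9), (9, 10)]
--     counts = [0] * 10
--     for result in results:
--         score = result.get('total_score', 0)
--         if 0 <= score < 10:
--             counts[int(score)] += 1
--     return [(f"{low}-{high}", counts[i]) for i, (low, high) in enumerate(bins) if counts[i] > 0]
-- ===== Notes on version B (the rewrite author's own statement) =====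
-- stated objective: simpler
-- what changed: The inner linear scan over the bins list is replaced by direct arithmetic bin indexing (counts[int(score)] under a 0 <= score < 10 guard); bins survive only to print the labels.
import Mathlib
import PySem

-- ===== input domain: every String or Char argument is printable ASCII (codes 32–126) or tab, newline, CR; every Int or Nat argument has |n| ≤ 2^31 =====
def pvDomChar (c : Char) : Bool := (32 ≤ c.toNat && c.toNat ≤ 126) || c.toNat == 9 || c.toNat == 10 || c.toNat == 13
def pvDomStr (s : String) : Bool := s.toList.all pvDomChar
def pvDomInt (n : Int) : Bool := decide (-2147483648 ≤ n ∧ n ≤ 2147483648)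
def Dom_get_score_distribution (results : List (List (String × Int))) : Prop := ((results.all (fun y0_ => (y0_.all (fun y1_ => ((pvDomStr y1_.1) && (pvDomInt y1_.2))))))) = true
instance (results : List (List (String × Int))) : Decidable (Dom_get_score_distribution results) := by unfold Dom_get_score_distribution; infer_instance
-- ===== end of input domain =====

-- B replaces A's inner linear scan over the bins list by direct arithmetic bin
-- indexing (counts[int(score)] under a 0 <= score < 10 guard): simpler, one pass.

-- ===== PORT A =====
-- the literal bins list of A (B keeps it only for the labels)
def pvBins : List (Int × Int) :=
  [(0, 1), (1, 2), (2, 3), (3, 4), (4, 5), (5, 6), (6, 7), (7, 8), (8, 9), (9, 10)]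

-- A's inner loop: scan enumerate(bins), increment the matching bin, break
def pvInnerA (counts : List Int) (score : Int) : List (Int × (Int × Int)) → List Int
  | [] => counts
  | (i, (low, high)) :: rest =>
    if low ≤ score ∧ score < high then
      PySem.List.pySetD counts i (PySem.List.pyGetD counts i 0 + 1)
    else pvInnerA counts score rest

-- A's outer loop body: score = result.get('total_score', 0), then the bin scan
def pvStepA (counts : List Int) (result : List (String × Int)) : List Int :=
  pvInnerA counts ((result.lookup "total_score").getD 0) (PySem.List.enumerate pvBins 0)

def get_score_distribution (results : List (List (String × Int))) : List (String × Int) :=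
  let counts := results.foldl pvStepA (List.replicate 10 0)
  (pvBins.zip counts).filterMap (fun p =>
    if p.2 > 0 then some (PySem.Int.toStr p.1.1 ++ "-" ++ PySem.Int.toStr p.1.2, p.2) else none)

-- ===== PORT B =====
-- B's loop body: direct arithmetic indexing under the range guard
def pvStepB (counts : List Int) (result : List (String × Int)) : List Int :=
  if 0 ≤ (result.lookup "total_score").getD 0 ∧ (result.lookup "total_score").getD 0 < 10 then
    PySem.List.pySetD counts ((result.lookup "total_score").getD 0)
      (PySem.List.pyGetD counts ((result.lookup "total_score").getD 0) 0 + 1)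
  else counts

def get_score_distribution_alt (results : List (List (String × Int))) : List (String × Int) :=
  let counts := results.foldl pvStepB (List.replicate 10 0)
  (PySem.List.enumerate pvBins 0).filterMap (fun p =>
    if PySem.List.pyGetD counts p.1 0 > 0 then
      some (PySem.Int.toStr p.2.1 ++ "-" ++ PySem.Int.toStr p.2.2, PySem.List.pyGetD counts p.1 0)
    else none)

-- ===== PRECONDITION & SPEC =====
def Spec_get_score_distribution (results : List (List (String × Int))) (out : List (String × Int)) : Prop := out = get_score_distribution_alt results
instance (results : List (List (String × Int))) (out : List (String × Int)) : Decidable (Spec_get_score_distribution results out) := by unfold Spec_get_score_distribution; infer_instance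

-- ===== CLAIM (what is proved, stated in full; the proofs are below) =====
def Claim_equal_get_score_distribution : Prop := ∀ (results : List (List (String × Int))), Dom_get_score_distribution results → Spec_get_score_distribution results (get_score_distribution results)

-- ===== LEMMAS AND PROOFS =====

-- the two loop bodies are the same function
theorem pvStep_eq (counts : List Int) (result : List (String × Int)) :
    pvStepA counts result = pvStepB counts result := by
  unfold pvStepA pvStepB
  generalize (result.lookup "total_score").getD 0 = s
  have he : PySem.List.enumerate pvBins 0 =
      [(0,(0,1)),(1,(1,2)),(2,(2,3)),(3,(3,4)),(4,(4,5)),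
       (5,(5,6)),(6,(6,7)),(7,(7,8)),(8,(8,9)),(9,(9,10))] := by decide
  rw [he]
  by_cases h : 0 ≤ s ∧ s < 10
  · obtain ⟨h1, h2⟩ := h
    interval_cases s <;> simp [pvInnerA]
  · rw [if_neg h]
    simp only [pvInnerA]
    split_ifs with h0 h1 h2 h3 h4 h5 h6 h7 h8 h9
    all_goals try rfl
    all_goals omega

theorem pvFold_eq (results : List (List (String × Int))) (counts : List Int) :
    results.foldl pvStepA counts = results.foldl pvStepB counts := by
  induction results generalizing counts with
  | nil => rfl
  | cons r rs ih => simp only [List.foldl_cons, pvStep_eq, ih]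

theorem pvStepB_length (counts : List Int) (result : List (String × Int)) :
    (pvStepB counts result).length = counts.length := by
  unfold pvStepB
  split_ifs <;> simp [PySem.List.length_pySetD]

theorem pvFoldB_length (results : List (List (String × Int))) (counts : List Int) :
    (results.foldl pvStepB counts).length = counts.length := by
  induction results generalizing counts with
  | nil => rfl
  | cons r rs ih => rw [List.foldl_cons, ih, pvStepB_length]

-- the two output comprehensions agree on any counts list of length 10
theorem pvOut_eq (counts : List Int) (h : counts.length = 10) :
    (pvBins.zip counts).filterMap (fun p =>
      if p.2 > 0 then some (PySem.Int.toStr p.1.1 ++ "-" ++ PySem.Int.toStr p.1.2, p.2) else none) =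
    (PySem.List.enumerate pvBins 0).filterMap (fun p =>
      if PySem.List.pyGetD counts p.1 0 > 0 then
        some (PySem.Int.toStr p.2.1 ++ "-" ++ PySem.Int.toStr p.2.2, PySem.List.pyGetD counts p.1 0)
      else none) := by
  match counts, h with
  | [c0, c1, c2, c3, c4, c5, c6, c7, c8, c9], _ =>
    simp [pvBins, PySem.List.enumerate, List.filterMap, PySem.List.pyGetD]

-- ===== VERDICT (by name: the statement is the Claim_ definition above) =====
theorem get_score_distribution_spec : Claim_equal_get_score_distribution := by
  intro results _
  unfold Spec_get_score_distribution get_score_distribution get_score_distribution_alt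
  rw [pvFold_eq]
  exact pvOut_eq _ (by rw [pvFoldB_length]; rfl)
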